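-- pv_equiv track=rewrite | github.com/yeonnseok/ps-algorithm | programmers/level2/숫자야구.py | check
-- ===== SOURCE A (Python) =====
-- def check(perm, pred, strike, ball):
--     s_cnt, b_cnt = 0, 0
--     for i in range(3):
--         if perm[i] == pred[i]:
--             s_cnt += 1
--         elif pred[i] in perm:
--             b_cnt += 1
--     if s_cnt == strike and b_cnt == ball:
--         return True
--     return False
-- ===== SOURCE B (Python) =====
-- def check(perm, pred, strike, ball):
--     def score(pairs):
--         if not pairs:
--             return (0, 0)
--         (p, q) = pairs[0]
--         s, b = score(pairs[1:])
--         if p == q: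
--             return (s + 1, b)
--         if q in perm:
--             return (s, b + 1)
--         return (s, b)
--     return score([(perm[i], pred[i]) for i in range(3)]) == (strike, ball)
-- ===== Notes on version B (the rewrite author's own statement) =====
-- stated objective: alternative
-- what changed: Replaces A's indexed loop with mutable strike/ball counters by a recursive decomposition: the three (perm[i], pred[i]) pairs are materialized once, a recursive helper scores them back-to-front returning a (strikes, balls) pair, and the result is a single tuple comparison against (strike, ball).
import Mathlib
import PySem

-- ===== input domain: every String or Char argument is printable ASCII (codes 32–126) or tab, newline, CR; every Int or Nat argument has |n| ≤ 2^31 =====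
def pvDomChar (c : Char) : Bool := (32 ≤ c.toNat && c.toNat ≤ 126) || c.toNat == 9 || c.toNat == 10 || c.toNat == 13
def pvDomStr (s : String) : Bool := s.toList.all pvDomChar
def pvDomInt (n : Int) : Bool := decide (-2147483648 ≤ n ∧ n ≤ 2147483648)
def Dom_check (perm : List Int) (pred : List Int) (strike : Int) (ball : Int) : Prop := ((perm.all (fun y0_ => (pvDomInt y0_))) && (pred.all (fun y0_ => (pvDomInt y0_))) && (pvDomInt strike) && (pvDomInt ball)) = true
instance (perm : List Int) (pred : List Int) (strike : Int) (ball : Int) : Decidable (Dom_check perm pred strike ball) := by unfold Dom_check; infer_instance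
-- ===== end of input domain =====

-- ===== PORT A =====
-- B replaces A's indexed counter loop by a recursive score over the materialized pair list; same cost.
-- Port of A: loop over range(3), Option state mirrors Python's IndexError (none = raise).
def check (perm : List Int) (pred : List Int) (strike : Int) (ball : Int) : Bool :=
  let r := (PySem.List.pyRange 0 3 1).foldl
    (fun (st : Option (Int × Int)) i =>
      st.bind (fun sb =>
        (PySem.List.pyGet? perm i).bind (fun a =>
          (PySem.List.pyGet? pred i).map (fun b =>
            if a = b then (sb.1 + 1, sb.2)
            else if b ∈ perm then (sb.1, sb.2 + 1)
            else sb))))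
    (some ((0 : Int), (0 : Int)))
  match r with
  | some (s, b) => decide (s = strike ∧ b = ball)
  | none => false

-- ===== PORT B =====
-- Port of B's recursive helper: scores the pair list back-to-front (rest first, then head).
def scoreB (perm : List Int) : List (Int × Int) → Int × Int
  | [] => (0, 0)
  | (p, q) :: rest =>
    let sb := scoreB perm rest
    if p = q then (sb.1 + 1, sb.2)
    else if q ∈ perm then (sb.1, sb.2 + 1)
    else sb

-- Port of B: materialize the pairs [(perm[i], pred[i]) for i in range(3)] (none = IndexError),
-- score them recursively, compare the resulting pair with (strike, ball).
def check_alt (perm : List Int) (pred : List Int) (strike : Int) (ball : Int) : Bool :=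
  let pairs := (PySem.List.pyRange 0 3 1).foldr
    (fun i (acc : Option (List (Int × Int))) =>
      acc.bind (fun l =>
        (PySem.List.pyGet? perm i).bind (fun p =>
          (PySem.List.pyGet? pred i).map (fun q => (p, q) :: l))))
    (some [])
  match pairs with
  | some l => decide (scoreB perm l = (strike, ball))
  | none => false

-- ===== PRECONDITION & SPEC =====
-- Pre_: Python A raises IndexError when perm or pred has fewer than 3 elements.
def Pre_check (perm : List Int) (pred : List Int) (strike : Int) (ball : Int) : Prop :=
  3 ≤ perm.length ∧ 3 ≤ pred.length
instance (perm : List Int) (pred : List Int) (strike : Int) (ball : Int) : Decidable (Pre_check perm pred strike ball) := by unfold Pre_check; infer_instance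
def pvWitness_check : List Int × List Int × Int × Int := ([1, 2, 3], [1, 3, 2], 1, 2)
def Spec_check (perm : List Int) (pred : List Int) (strike : Int) (ball : Int) (out : Bool) : Prop := out = check_alt perm pred strike ball
instance (perm : List Int) (pred : List Int) (strike : Int) (ball : Int) (out : Bool) : Decidable (Spec_check perm pred strike ball out) := by unfold Spec_check; infer_instance

-- ===== CLAIM (what is proved, stated in full; the proofs are below) =====
def Claim_equal_check : Prop := ∀ (perm : List Int) (pred : List Int) (strike : Int) (ball : Int), Dom_check perm pred strike ball → Pre_check perm pred strike ball → Spec_check perm pred strike ball (check perm pred strike ball)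

-- ===== LEMMAS AND PROOFS =====

-- pyGet? on a cons-list of length ≥ 3 at the three literal indices used by both ports.
theorem pvGet3 (a b c : Int) (l : List Int) :
    PySem.List.pyGet? (a :: b :: c :: l) 0 = some a ∧
    PySem.List.pyGet? (a :: b :: c :: l) 1 = some b ∧
    PySem.List.pyGet? (a :: b :: c :: l) 2 = some c := by
  have h0 : (0:Int) ≤ ↑l.length + 1 + 1 := by omega
  have h1 : (0:Int) ≤ ↑l.length + 1 := by omega
  have h2 : (2:Int) ≤ ↑l.length + 1 + 1 := by omega
  refine ⟨?_, ?_, ?_⟩ <;> simp [PySem.List.pyGet?, PySem.List.pyIdx?, h0, h1, h2]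

set_option maxHeartbeats 1000000 in
theorem pvMainEq (a b c x y z : Int) (ps qs : List Int) (strike ball : Int) :
    check (a :: b :: c :: ps) (x :: y :: z :: qs) strike ball =
    check_alt (a :: b :: c :: ps) (x :: y :: z :: qs) strike ball := by
  obtain ⟨p0, p1, p2⟩ := pvGet3 a b c ps
  obtain ⟨q0, q1, q2⟩ := pvGet3 x y z qs
  have hr : PySem.List.pyRange 0 3 1 = [0, 1, 2] := by decide
  simp only [check, check_alt, hr, List.foldl, List.foldr, p0, p1, p2, q0, q1, q2,
    Option.bind_some, Option.map_some, scoreB]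
  rw [Bool.eq_iff_iff]
  simp only [decide_eq_true_eq, Prod.mk.injEq]
  split_ifs <;> simp

-- ===== VERDICT (by name: the statement is the Claim_ definition above) =====
theorem check_spec : Claim_equal_check := by
  intro perm pred strike ball _ hpre
  obtain ⟨hp, hq⟩ := hpre
  match perm, pred with
  | a :: b :: c :: ps, x :: y :: z :: qs =>
    exact pvMainEq a b c x y z ps qs strike ball
  | [], _ => simp at hp
  | [_], _ => simp at hp
  | [_, _], _ => simp at hp
  | _ :: _ :: _ :: _, [] => simp at hq
  | _ :: _ :: _ :: _, [_] => simp at hq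
  | _ :: _ :: _ :: _, [_, _] => simp at hq
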